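-- pv_equiv track=rewrite | github.com/ankitshah009/leetcode_python | graphs/1801-number_of_orders_in_the_backlog.py | getNumberOfBacklogOrders
-- ===== SOURCE A (Python) =====
-- from typing import List
-- import heapq
--
-- def getNumberOfBacklogOrders(orders: List[List[int]]) -> int:
--     """
--     Use two heaps: max-heap for buy orders, min-heap for sell orders.
--     """
--     MOD = 10**9 + 7
--     buy_heap = []   # max-heap (negated prices)
--     sell_heap = []  # min-heap
--
--     for price, amount, order_type in orders:
--         if order_type == 0:  # Buy order
--             # Match with sell orders
--             while amount > 0 and sell_heap and sell_heap[0][0] <= price: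
--                 sell_price, sell_amount = heapq.heappop(sell_heap)
--                 matched = min(amount, sell_amount)
--                 amount -= matched
--                 sell_amount -= matched
--                 if sell_amount > 0:
--                     heapq.heappush(sell_heap, (sell_price, sell_amount))
--
--             if amount > 0:
--                 heapq.heappush(buy_heap, (-price, amount))
--
--         else:  # Sell order
--             # Match with buy orders
--             while amount > 0 and buy_heap and -buy_heap[0][0] >= price:
--                 buy_price, buy_amount = heapq.heappop(buy_heap)
--                 matched = min(amount, buy_amount)
--                 amount -= matched
--                 buy_amount -= matched
--                 if buy_amount > 0:
--                     heapq.heappush(buy_heap, (buy_price, buy_amount))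
--
--             if amount > 0:
--                 heapq.heappush(sell_heap, (price, amount))
--
--     # Sum remaining orders
--     total = sum(amt for _, amt in buy_heap) + sum(amt for _, amt in sell_heap)
--     return total % MOD
-- ===== SOURCE B (Python) =====
-- def getNumberOfBacklogOrders(orders):
--     MOD = 10 ** 9 + 7
--     # Two symmetric order books with NORMALIZED keys, each kept as an ascending
--     # list of [key, amount] levels with one entry per key:
--     #   books[0] = buy  backlog, keyed by -price (so the best buy is the smallest key)
--     #   books[1] = sell backlog, keyed by  price (so the best sell is the smallest key)
--     # With that normalization, matching any incoming order is the SAME operation: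
--     # consume levels of the opposite book while its smallest key is <= -key.
--     books = ([], [])
--     for price, amount, side in orders:
--         own = 0 if side == 0 else 1
--         key = -price if own == 0 else price
--         amount = _fill(books[1 - own], -key, amount)
--         if amount > 0:
--             _bump(books[own], key, amount)
--     return (sum(a for _, a in books[0]) + sum(a for _, a in books[1])) % MOD
--
--
-- def _fill(book, limit, amount):
--     """Consume ascending book levels with key <= limit; return the leftover amount."""
--     while amount > 0 and book and book[0][0] <= limit:
--         take = min(amount, book[0][1])
--         amount -= take
--         book[0][1] -= take
--         if book[0][1] == 0:
--             del book[0]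
--     return amount
--
--
-- def _bump(book, key, amount):
--     """Merge amount into the ascending book at key (linear sorted insert)."""
--     for i, lvl in enumerate(book):
--         if lvl[0] == key:
--             lvl[1] += amount
--             return
--         if lvl[0] > key:
--             book.insert(i, [key, amount])
--             return
--     book.append([key, amount])
-- ===== Notes on version B (the rewrite author's own statement) =====
-- stated objective: alternative
-- what changed: Replaces A's two heapq heaps of individual (price, amount) orders by two price-aggregated ascending books with normalized keys (buys keyed by -price, sells by price), so buy and sell sides are handled by one symmetric fill/bump pair that consumes a whole price level per step and merges leftovers by sorted insertion.
import Mathlib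
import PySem

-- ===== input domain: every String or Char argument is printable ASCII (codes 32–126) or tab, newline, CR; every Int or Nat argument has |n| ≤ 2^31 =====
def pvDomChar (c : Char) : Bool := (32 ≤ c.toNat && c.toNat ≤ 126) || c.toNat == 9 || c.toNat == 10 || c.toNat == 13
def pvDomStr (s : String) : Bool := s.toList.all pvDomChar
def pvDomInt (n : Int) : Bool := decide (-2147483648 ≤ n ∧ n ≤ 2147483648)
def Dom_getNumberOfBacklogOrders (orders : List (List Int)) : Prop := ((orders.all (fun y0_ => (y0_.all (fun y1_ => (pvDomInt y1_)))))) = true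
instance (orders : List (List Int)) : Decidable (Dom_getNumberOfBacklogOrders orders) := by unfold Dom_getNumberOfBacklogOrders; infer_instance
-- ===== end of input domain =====

-- B replaces A's two heaps of individual orders by two price-aggregated books with
-- normalized keys, so one symmetric fill/bump pair handles both sides (objective: alternative).

-- ===== PORT A =====
-- heapq is modelled by a lexicographically sorted list: heappush = ordered
-- insert, heappop = take the head.  Python's heappop returns the minimum tuple
-- and tuples are compared by value, so this models the heapq calls exactly.
def pairLe (x y : Int × Int) : Bool := x.1 < y.1 || (x.1 == y.1 && x.2 ≤ y.2)

def hpush (x : Int × Int) : List (Int × Int) → List (Int × Int)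
  | [] => [x]
  | h :: t => if pairLe h x then h :: hpush x t else x :: h :: t

theorem hpush_length (x : Int × Int) (l : List (Int × Int)) :
    (hpush x l).length = l.length + 1 := by
  induction l with
  | nil => rfl
  | cons h t ih => simp only [hpush]; split <;> simp [ih]

-- A's inner while-loop for a buy order against the sell heap.
def sellLoopA (price amt : Int) (l : List (Int × Int)) : Int × List (Int × Int) :=
  if 0 < amt then
    match l with
    | [] => (amt, [])
    | (sp, sa) :: t =>
      if sp ≤ price then
        let m := min amt sa
        if 0 < sa - m then sellLoopA price (amt - m) (hpush (sp, sa - m) t)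
        else sellLoopA price (amt - m) t
      else (amt, (sp, sa) :: t)
  else (amt, l)
termination_by (l.length, amt.toNat)
decreasing_by
  · simp only [hpush_length, List.length_cons]
    exact Prod.Lex.right _ (by omega)
  · exact Prod.Lex.left _ _ (by simp)

-- A's inner while-loop for a sell order against the buy heap (prices negated).
def buyLoopA (price amt : Int) (l : List (Int × Int)) : Int × List (Int × Int) :=
  if 0 < amt then
    match l with
    | [] => (amt, [])
    | (bq, ba) :: t =>
      if price ≤ -bq then
        let m := min amt ba
        if 0 < ba - m then buyLoopA price (amt - m) (hpush (bq, ba - m) t)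
        else buyLoopA price (amt - m) t
      else (amt, (bq, ba) :: t)
  else (amt, l)
termination_by (l.length, amt.toNat)
decreasing_by
  · simp only [hpush_length, List.length_cons]
    exact Prod.Lex.right _ (by omega)
  · exact Prod.Lex.left _ _ (by simp)

-- One iteration of A's 'for price, amount, order_type in orders' loop; rows of
-- length ≠ 3 make Python raise ValueError (excluded by Pre_), here a no-op.
def stepA (st : List (Int × Int) × List (Int × Int)) (row : List Int) :
    List (Int × Int) × List (Int × Int) :=
  match row with
  | [price, amount, otype] =>
    if otype == 0 then
      let r := sellLoopA price amount st.2
      if 0 < r.1 then (hpush (-price, r.1) st.1, r.2) else (st.1, r.2)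
    else
      let r := buyLoopA price amount st.1
      if 0 < r.1 then (r.2, hpush (price, r.1) st.2) else (r.2, st.2)
  | _ => st

def getNumberOfBacklogOrders (orders : List (List Int)) : Int :=
  let st := orders.foldl stepA ([], [])
  PySem.Int.mod ((st.1.map Prod.snd).sum + (st.2.map Prod.snd).sum) (10 ^ 9 + 7)

-- ===== PORT B =====
-- _fill(book, limit, amount): consume ascending levels with key <= limit,
-- return the leftover amount (here together with the updated book).
def fill (limit amt : Int) (book : List (Int × Int)) : Int × List (Int × Int) :=
  if 0 < amt then
    match book with
    | [] => (amt, [])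
    | (k, v) :: t =>
      if k ≤ limit then
        let take := min amt v
        if v - take == 0 then fill limit (amt - take) t
        else fill limit (amt - take) ((k, v - take) :: t)
      else (amt, (k, v) :: t)
  else (amt, book)
termination_by (book.length, amt.toNat)
decreasing_by
  · exact Prod.Lex.left _ _ (by simp)
  · exact Prod.Lex.right _ (by simp only [beq_iff_eq] at *; omega)

-- _bump(book, key, amount): merge amount into the ascending book at key.
def bump (key amt : Int) : List (Int × Int) → List (Int × Int)
  | [] => [(key, amt)]
  | (k, v) :: t =>
    if k == key then (k, v + amt) :: t
    else if key < k then (key, amt) :: (k, v) :: t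
    else (k, v) :: bump key amt t

-- One iteration of B's order loop over books = (buys keyed by -price, sells
-- keyed by price); rows of length ≠ 3: Python raises, a no-op here.
def stepB (st : List (Int × Int) × List (Int × Int)) (row : List Int) :
    List (Int × Int) × List (Int × Int) :=
  match row with
  | [price, amount, side] =>
    let key := if side == 0 then -price else price
    if side == 0 then
      let r := fill (-key) amount st.2
      if 0 < r.1 then (bump key r.1 st.1, r.2) else (st.1, r.2)
    else
      let r := fill (-key) amount st.1
      if 0 < r.1 then (r.2, bump key r.1 st.2) else (r.2, st.2)
  | _ => st

def getNumberOfBacklogOrders_alt (orders : List (List Int)) : Int :=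
  let books := orders.foldl stepB ([], [])
  PySem.Int.mod ((books.1.map Prod.snd).sum + (books.2.map Prod.snd).sum) (10 ^ 9 + 7)

-- ===== PRECONDITION & SPEC =====
-- Pre_ excludes exactly the rows that are not [price, amount, order_type]
-- triples: Python's 'for price, amount, order_type in orders' raises ValueError there.
def Pre_getNumberOfBacklogOrders (orders : List (List Int)) : Prop :=
  ∀ row ∈ orders, row.length = 3
instance (orders : List (List Int)) : Decidable (Pre_getNumberOfBacklogOrders orders) := by
  unfold Pre_getNumberOfBacklogOrders; infer_instance

def pvWitness_getNumberOfBacklogOrders : List (List Int) :=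
  [[10, 5, 0], [15, 2, 1], [25, 1, 1], [30, 4, 0]]

def Spec_getNumberOfBacklogOrders (orders : List (List Int)) (out : Int) : Prop :=
  out = getNumberOfBacklogOrders_alt orders
instance (orders : List (List Int)) (out : Int) :
    Decidable (Spec_getNumberOfBacklogOrders orders out) := by
  unfold Spec_getNumberOfBacklogOrders; infer_instance

-- ===== CLAIM (what is proved, stated in full; the proofs are below) =====
def Claim_equal_getNumberOfBacklogOrders : Prop :=
  ∀ (orders : List (List Int)), Dom_getNumberOfBacklogOrders orders →
    Pre_getNumberOfBacklogOrders orders →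
    Spec_getNumberOfBacklogOrders orders (getNumberOfBacklogOrders orders)

-- ===== LEMMAS AND PROOFS =====

def SortedLex (l : List (Int × Int)) : Prop := l.Pairwise (fun x y => pairLe x y = true)

def PosA (l : List (Int × Int)) : Prop := ∀ x ∈ l, 0 < x.2

-- group a lex-sorted list by price, summing amounts
def agg : List (Int × Int) → List (Int × Int)
  | [] => []
  | (p, a) :: t =>
    match agg t with
    | [] => [(p, a)]
    | (q, b) :: r => if q = p then (p, a + b) :: r else (p, a) :: (q, b) :: r

-- proof-side bridge forms of B's fill/bump, with A-shaped branch conditions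
def sellLoopB (price amt : Int) (l : List (Int × Int)) : Int × List (Int × Int) :=
  if 0 < amt then
    match l with
    | [] => (amt, [])
    | (sp, sa) :: t =>
      if sp ≤ price then
        let m := min amt sa
        if m < sa then sellLoopB price (amt - m) ((sp, sa - m) :: t)
        else sellLoopB price (amt - m) t
      else (amt, (sp, sa) :: t)
  else (amt, l)
termination_by (l.length, amt.toNat)
decreasing_by
  · exact Prod.Lex.right _ (by omega)
  · exact Prod.Lex.left _ _ (by simp)

def addAsc (price amt : Int) : List (Int × Int) → List (Int × Int)
  | [] => [(price, amt)]
  | (q, b) :: t =>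
    if q < price then (q, b) :: addAsc price amt t
    else if q == price then (price, b + amt) :: t
    else (price, amt) :: (q, b) :: t

theorem bump_eq_addAsc (key amt : Int) (l : List (Int × Int)) :
    bump key amt l = addAsc key amt l := by
  induction l with
  | nil => rfl
  | cons x t ih =>
    obtain ⟨k, v⟩ := x
    simp only [bump, addAsc]
    split_ifs <;> simp_all <;> omega

theorem sellLoopB_stop (price amt : Int) (l : List (Int × Int)) (h : ¬ 0 < amt) :
    sellLoopB price amt l = (amt, l) := by
  rw [sellLoopB.eq_def]
  cases l with
  | nil => simp [h]
  | cons x t => obtain ⟨a, b⟩ := x; simp [h]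

theorem fill_eq_sellLoopB (limit amt : Int) (book : List (Int × Int)) :
    fill limit amt book = sellLoopB limit amt book := by
  refine fill.induct limit
    (fun amt book => fill limit amt book = sellLoopB limit amt book)
    ?_ ?_ ?_ ?_ ?_ amt book
  · intro amt h
    rw [fill.eq_def, sellLoopB.eq_def]
    try simp [h]
  · intro amt h k v t hk take hz ih
    replace ih : fill limit (amt - min amt v) t = sellLoopB limit (amt - min amt v) t := ih
    replace hz : (v - min amt v == 0) = true := hz
    show fill limit amt ((k, v) :: t) = sellLoopB limit amt ((k, v) :: t)
    rw [fill.eq_def, sellLoopB.eq_def]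
    simp only [beq_iff_eq] at hz
    simp only [if_pos h, if_pos hk, if_pos hz, beq_iff_eq,
      if_neg (show ¬ min amt v < v by omega)]
    exact ih
  · intro amt h k v t hk take hz ih
    replace ih : fill limit (amt - min amt v) ((k, v - min amt v) :: t) = sellLoopB limit (amt - min amt v) ((k, v - min amt v) :: t) := ih
    replace hz : ¬ (v - min amt v == 0) = true := hz
    show fill limit amt ((k, v) :: t) = sellLoopB limit amt ((k, v) :: t)
    rw [fill.eq_def, sellLoopB.eq_def]
    simp only [beq_iff_eq] at hz
    have hle : min amt v ≤ v := min_le_right _ _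
    simp only [if_pos h, if_pos hk, beq_iff_eq, if_neg hz,
      if_pos (show min amt v < v by omega)]
    exact ih
  · intro amt h k v t hk
    rw [fill.eq_def, sellLoopB.eq_def]
    simp [h, hk]
  · intro amt book h
    rw [fill.eq_def, sellLoopB_stop _ _ _ h]
    cases book with
    | nil => simp [h]
    | cons x t => obtain ⟨a, b⟩ := x; simp [h]

theorem pairLe_iff (x y : Int × Int) :
    pairLe x y = true ↔ (x.1 < y.1 ∨ (x.1 = y.1 ∧ x.2 ≤ y.2)) := by
  simp [pairLe]

theorem hpush_mem (x : Int × Int) (l : List (Int × Int)) (y : Int × Int) :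
    y ∈ hpush x l ↔ y = x ∨ y ∈ l := by
  induction l with
  | nil => simp [hpush]
  | cons h t ih =>
    simp only [hpush]
    split
    · rw [List.mem_cons, ih, List.mem_cons]
      tauto
    · rw [List.mem_cons]

theorem pairLe_total (x y : Int × Int) (h : ¬ pairLe x y = true) : pairLe y x = true := by
  simp only [pairLe_iff] at *; omega

theorem pairLe_trans (x y z : Int × Int) (h1 : pairLe x y = true)
    (h2 : pairLe y z = true) : pairLe x z = true := by
  simp only [pairLe_iff] at *; omega

theorem agg_pos (l : List (Int × Int)) (h : PosA l) : PosA (agg l) := by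
  induction l with
  | nil => simpa [agg] using h
  | cons x t ih =>
    obtain ⟨p, a⟩ := x
    have ha : 0 < a := h (p, a) (by simp)
    have ht : PosA t := fun y hy => h y (by simp [hy])
    have ih' := ih ht
    cases hagg : agg t with
    | nil =>
      intro y hy
      simp [agg, hagg] at hy
      simp [hy, ha]
    | cons z r =>
      obtain ⟨q, b⟩ := z
      rw [hagg] at ih'
      have hb : 0 < b := ih' (q, b) (by simp)
      by_cases hqp : q = p
      · intro y hy
        simp only [agg, hagg, if_pos hqp] at hy
        rcases List.mem_cons.1 hy with h1 | h2
        · simp [h1]; omega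
        · exact ih' y (by simp [h2])
      · intro y hy
        simp only [agg, hagg, if_neg hqp] at hy
        rcases List.mem_cons.1 hy with h1 | h2
        · simp [h1, ha]
        · exact ih' y h2

theorem agg_lb (q : Int) (l : List (Int × Int)) (h : ∀ x ∈ l, q ≤ x.1) :
    ∀ y ∈ agg l, q ≤ y.1 := by
  induction l with
  | nil => simp [agg]
  | cons x t ih =>
    obtain ⟨p, a⟩ := x
    have hp : q ≤ p := h (p, a) (by simp)
    have ih' := ih (fun y hy => h y (by simp [hy]))
    cases hagg : agg t with
    | nil =>
      intro y hy
      simp [agg, hagg] at hy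
      simp [hy, hp]
    | cons z r =>
      obtain ⟨p', b⟩ := z
      rw [hagg] at ih'
      by_cases hqp : p' = p
      · intro y hy
        simp only [agg, hagg, if_pos hqp] at hy
        rcases List.mem_cons.1 hy with h1 | h2
        · simp [h1, hp]
        · exact ih' y (by simp [h2])
      · intro y hy
        simp only [agg, hagg, if_neg hqp] at hy
        rcases List.mem_cons.1 hy with h1 | h2
        · simp [h1, hp]
        · exact ih' y h2

theorem agg_sum (l : List (Int × Int)) :
    ((agg l).map Prod.snd).sum = (l.map Prod.snd).sum := by
  induction l with
  | nil => simp [agg]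
  | cons x t ih =>
    obtain ⟨p, a⟩ := x
    cases hagg : agg t with
    | nil =>
      rw [hagg] at ih
      simp [agg, hagg] at ih ⊢
      omega
    | cons z r =>
      obtain ⟨p', b⟩ := z
      rw [hagg] at ih
      by_cases hqp : p' = p
      · simp only [agg, hagg, if_pos hqp]
        simp at ih ⊢
        omega
      · simp only [agg, hagg, if_neg hqp]
        simp at ih ⊢
        omega

theorem hpush_sorted (x : Int × Int) (l : List (Int × Int)) (h : SortedLex l) :
    SortedLex (hpush x l) := by
  induction l with
  | nil => simp [hpush, SortedLex]
  | cons hd t ih =>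
    rw [SortedLex, List.pairwise_cons] at h
    simp only [hpush]
    split
    · rename_i hc
      rw [SortedLex, List.pairwise_cons]
      refine ⟨?_, ih h.2⟩
      intro y hy
      rcases (hpush_mem x t y).1 hy with rfl | hy'
      · exact hc
      · exact h.1 y hy'
    · rename_i hc
      rw [SortedLex, List.pairwise_cons]
      refine ⟨?_, List.Pairwise.cons h.1 h.2⟩
      intro y hy
      rcases List.mem_cons.1 hy with rfl | hy'
      · exact pairLe_total _ _ hc
      · exact pairLe_trans _ _ _ (pairLe_total _ _ hc) (h.1 y hy')

theorem hpush_pos (x : Int × Int) (l : List (Int × Int)) (h : PosA l) (hx : 0 < x.2) :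
    PosA (hpush x l) := by
  intro y hy
  rcases (hpush_mem x l y).1 hy with rfl | hy'
  · exact hx
  · exact h y hy'

theorem hpush_head (sp sa sa' : Int) (t : List (Int × Int))
    (h : ∀ x ∈ t, pairLe (sp, sa) x = true) (hlt : sa' < sa) :
    hpush (sp, sa') t = (sp, sa') :: t := by
  cases t with
  | nil => rfl
  | cons hd t2 =>
    obtain ⟨q, b⟩ := hd
    have h1 := h (q, b) (by simp)
    simp only [pairLe_iff] at h1
    simp only [hpush]
    rw [if_neg]
    simp only [pairLe_iff]
    omega

set_option maxRecDepth 4096 in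
theorem agg_hpush (p a : Int) (l : List (Int × Int)) (h : SortedLex l) :
    agg (hpush (p, a) l) = addAsc p a (agg l) := by
  induction l with
  | nil => rfl
  | cons x t ih =>
    obtain ⟨q, b⟩ := x
    rw [SortedLex, List.pairwise_cons] at h
    have hkey : ∀ y ∈ agg t, q ≤ y.1 := by
      refine agg_lb q t ?_
      intro z hz
      have h1 := h.1 z hz
      rw [pairLe_iff] at h1
      omega
    have ih' := ih h.2
    by_cases hc0 : pairLe (q, b) (p, a) = true
    · have hc := (pairLe_iff _ _).1 hc0
      simp only [hpush, if_pos hc0]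
      cases hagg : agg t with
      | nil =>
        simp only [agg, ih', hagg, addAsc]
        split_ifs <;> simp_all [addAsc] <;> (try split_ifs) <;> (try simp_all) <;> omega
      | cons z r =>
        obtain ⟨q', c⟩ := z
        have hq' : q ≤ q' := hkey (q', c) (by rw [hagg]; simp)
        rw [hagg] at ih'
        clear hkey hc0 h ih
        simp only [agg, ih', hagg, addAsc]
        clear ih' hagg
        split_ifs <;> (simp only [beq_iff_eq] at *) <;> (try subst_vars) <;> simp [addAsc, *] <;> (try split_ifs) <;> (try omega) <;> (try subst_vars) <;> (first | rfl | (simp only [List.cons.injEq, Prod.mk.injEq, and_true, true_and, eq_self_iff_true]; omega))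
    · have hc : p < q ∨ (p = q ∧ a < b) := by
        rw [pairLe_iff] at hc0
        omega
      simp only [hpush, if_neg hc0]
      cases hagg : agg t with
      | nil =>
        simp only [agg, hagg, addAsc]
        split_ifs <;> simp_all [addAsc] <;> (try split_ifs) <;> (try simp_all) <;> omega
      | cons z r =>
        obtain ⟨q', c⟩ := z
        have hq' : q ≤ q' := hkey (q', c) (by rw [hagg]; simp)
        clear hkey hc0 h ih ih'
        simp only [agg, hagg, addAsc]
        clear hagg
        split_ifs <;> (simp only [beq_iff_eq] at *) <;> (try subst_vars) <;> simp [addAsc, *] <;> (try split_ifs) <;> (try omega) <;> (try subst_vars) <;> (first | rfl | (simp only [List.cons.injEq, Prod.mk.injEq, and_true, true_and, eq_self_iff_true]; omega))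

theorem loopB_absorb (price sp sa amt : Int) (t : List (Int × Int))
    (hsa : 0 < sa) (hle : sa ≤ amt) (hsp : sp ≤ price) (hpos : PosA t) :
    sellLoopB price amt (agg ((sp, sa) :: t)) = sellLoopB price (amt - sa) (agg t) := by
  have hamt : 0 < amt := lt_of_lt_of_le hsa hle
  cases hagg : agg t with
  | nil =>
    have hmin : min amt sa = sa := min_eq_right hle
    rw [show agg ((sp, sa) :: t) = [(sp, sa)] from by simp [agg, hagg]]
    rw [sellLoopB.eq_def]
    simp [hamt, hsp, hmin]
  | cons z r =>
    obtain ⟨q, b⟩ := z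
    have hb : 0 < b := agg_pos t hpos (q, b) (by rw [hagg]; simp)
    by_cases hq : q = sp
    · subst hq
      rw [show agg ((q, sa) :: t) = (q, sa + b) :: r from by simp [agg, hagg]]
      by_cases h2 : sa + b ≤ amt
      · have hmin1 : min amt (sa + b) = sa + b := min_eq_right h2
        have hmin2 : min (amt - sa) b = b := min_eq_right (by omega)
        rw [sellLoopB.eq_def]
        conv_rhs => rw [sellLoopB.eq_def]
        simp [hamt, hsp, hmin1, hmin2, show (0:Int) < amt - sa by omega,
          show ¬ sa + b < sa + b by omega, show ¬ b < b by omega]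
        rw [show amt - (sa + b) = amt - sa - b from by omega,
          if_pos (show sa < amt from by omega)]
      · have hmin1 : min amt (sa + b) = amt := min_eq_left (by omega)
        rw [sellLoopB.eq_def]
        conv_rhs => rw [sellLoopB.eq_def]
        by_cases h3 : sa < amt
        · have hmin2 : min (amt - sa) b = amt - sa := min_eq_left (by omega)
          simp [hamt, hsp, hmin1, hmin2, show (0:Int) < amt - sa by omega,
            show amt < sa + b from by omega, show amt - sa < b from by omega]
          rw [sellLoopB_stop _ _ _ (by omega), sellLoopB_stop _ _ _ (by omega)]
          rw [if_pos h3, show b - (amt - sa) = sa + b - amt from by omega]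
        · have hsa' : amt = sa := by omega
          simp [hamt, hsp, hmin1, show amt < sa + b from by omega,
            show ¬ (0:Int) < amt - sa from by omega]
          rw [sellLoopB_stop _ _ _ (by omega)]
          subst hsa'
          rw [if_neg h3, show amt + b - amt = b from by omega,
            show amt - amt = (0:Int) from by omega]
    · rw [show agg ((sp, sa) :: t) = (sp, sa) :: (q, b) :: r from by simp [agg, hagg, hq]]
      rw [sellLoopB.eq_def]
      have hmin : min amt sa = sa := min_eq_right hle
      simp [hamt, hsp, hmin]

theorem sellLoopA_stop (price amt : Int) (l : List (Int × Int)) (h : ¬ 0 < amt) :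
    sellLoopA price amt l = (amt, l) := by
  rw [sellLoopA.eq_def]
  cases l with
  | nil => simp [h]
  | cons x t => obtain ⟨a, b⟩ := x; simp [h]

theorem agg_cons_shape (p a : Int) (t : List (Int × Int)) :
    ∃ S r', agg ((p, a) :: t) = (p, S) :: r' := by
  cases hagg : agg t with
  | nil => exact ⟨a, [], by simp [agg, hagg]⟩
  | cons z r =>
    obtain ⟨q, b⟩ := z
    by_cases hq : q = p
    · exact ⟨a + b, r, by simp [agg, hagg, hq]⟩
    · exact ⟨a, (q, b) :: r, by simp [agg, hagg, hq]⟩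

theorem sell_sim (price : Int) (l : List (Int × Int)) :
    ∀ amt, SortedLex l → PosA l →
      (sellLoopA price amt l).1 = (sellLoopB price amt (agg l)).1
      ∧ agg (sellLoopA price amt l).2 = (sellLoopB price amt (agg l)).2
      ∧ SortedLex (sellLoopA price amt l).2 ∧ PosA (sellLoopA price amt l).2 := by
  induction l with
  | nil =>
    intro amt hs hp
    have hA : sellLoopA price amt [] = (amt, []) := by
      rw [sellLoopA.eq_def]; split <;> rfl
    have hB : sellLoopB price amt [] = (amt, []) := by
      rw [sellLoopB.eq_def]; split <;> rfl
    rw [show agg ([] : List (Int × Int)) = [] from rfl, hA, hB]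
    exact ⟨rfl, rfl, hs, hp⟩
  | cons x t ih =>
    obtain ⟨sp, sa⟩ := x
    intro amt hs hp
    have hsa : 0 < sa := hp (sp, sa) (by simp)
    have hsp_all : ∀ y ∈ t, pairLe (sp, sa) y = true := (List.pairwise_cons.1 hs).1
    have hst : SortedLex t := (List.pairwise_cons.1 hs).2
    have hpt : PosA t := fun y hy => hp y (by simp [hy])
    by_cases hamt : 0 < amt
    · by_cases hle : sp ≤ price
      · by_cases hbig : sa ≤ amt
        · -- A consumes the whole head entry; B absorbs it into the head group
          have hminA : min amt sa = sa := min_eq_right hbig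
          have hA : sellLoopA price amt ((sp, sa) :: t) = sellLoopA price (amt - sa) t := by
            rw [sellLoopA.eq_def]
            simp [hamt, hle, hminA]
          have hB := loopB_absorb price sp sa amt t hsa hbig hle hpt
          rw [hA, hB]
          exact ih (amt - sa) hst hpt
        · -- A consumes part of the head entry and stops
          have hminA : min amt sa = amt := min_eq_left (by omega)
          have hpu : hpush (sp, sa - amt) t = (sp, sa - amt) :: t :=
            hpush_head sp sa _ t hsp_all (by omega)
          have hA : sellLoopA price amt ((sp, sa) :: t) = (0, (sp, sa - amt) :: t) := by
            rw [sellLoopA.eq_def]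
            simp [hamt, hle, hminA, hpu]
            rw [if_pos (show amt < sa from by omega)]
            exact sellLoopA_stop _ _ _ (by omega)
          have hsorted' : SortedLex ((sp, sa - amt) :: t) := by
            rw [SortedLex, List.pairwise_cons]
            refine ⟨?_, hst⟩
            intro y hy
            have h1 := hsp_all y hy
            rw [pairLe_iff] at h1 ⊢
            omega
          have hpos' : PosA ((sp, sa - amt) :: t) := by
            intro y hy
            rcases List.mem_cons.1 hy with rfl | hy'
            · simp; omega
            · exact hpt y hy'
          rw [hA]
          cases hagg : agg t with
          | nil =>
            have hB : sellLoopB price amt (agg ((sp, sa) :: t)) = (0, [(sp, sa - amt)]) := by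
              rw [show agg ((sp, sa) :: t) = [(sp, sa)] from by simp [agg, hagg]]
              rw [sellLoopB.eq_def]
              simp [hamt, hle, hminA, show amt < sa from by omega]
              try rw [sellLoopB_stop _ _ _ (by omega)]
              try simp
            rw [hB]
            exact ⟨rfl, by simp [agg, hagg], hsorted', hpos'⟩
          | cons z r =>
            obtain ⟨q, b⟩ := z
            have hb : 0 < b := agg_pos t hpt (q, b) (by rw [hagg]; simp)
            by_cases hq : q = sp
            · subst hq
              have hB : sellLoopB price amt (agg ((q, sa) :: t)) = (0, (q, sa + b - amt) :: r) := by
                rw [show agg ((q, sa) :: t) = (q, sa + b) :: r from by simp [agg, hagg]]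
                rw [sellLoopB.eq_def]
                have hm : min amt (sa + b) = amt := min_eq_left (by omega)
                simp [hamt, hle, hm, show amt < sa + b from by omega]
                try rw [sellLoopB_stop _ _ _ (by omega)]
                try simp
              rw [hB]
              refine ⟨rfl, ?_, hsorted', hpos'⟩
              rw [show agg ((q, sa - amt) :: t) = (q, (sa - amt) + b) :: r from by simp [agg, hagg]]
              simp only [List.cons.injEq, Prod.mk.injEq]
              exact ⟨⟨trivial, by omega⟩, trivial⟩
            · have hB : sellLoopB price amt (agg ((sp, sa) :: t)) = (0, (sp, sa - amt) :: (q, b) :: r) := by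
                rw [show agg ((sp, sa) :: t) = (sp, sa) :: (q, b) :: r from by simp [agg, hagg, hq]]
                rw [sellLoopB.eq_def]
                simp [hamt, hle, hminA, show amt < sa from by omega]
                try rw [sellLoopB_stop _ _ _ (by omega)]
                try simp
              rw [hB]
              exact ⟨rfl, by simp [agg, hagg, hq], hsorted', hpos'⟩
      · -- head sell price above the buy price: both loops stop
        have hA : sellLoopA price amt ((sp, sa) :: t) = (amt, (sp, sa) :: t) := by
          rw [sellLoopA.eq_def]; simp [hamt, hle]
        obtain ⟨S, r', hshape⟩ := agg_cons_shape sp sa t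
        have hB : sellLoopB price amt (agg ((sp, sa) :: t)) = (amt, agg ((sp, sa) :: t)) := by
          rw [hshape, sellLoopB.eq_def]
          simp [hamt, hle]
        rw [hA, hB]
        exact ⟨rfl, rfl, hs, hp⟩
    · rw [sellLoopA_stop _ _ _ hamt, sellLoopB_stop _ _ _ hamt]
      exact ⟨rfl, rfl, hs, hp⟩

theorem buyLoopA_stop (price amt : Int) (l : List (Int × Int)) (h : ¬ 0 < amt) :
    buyLoopA price amt l = (amt, l) := by
  rw [buyLoopA.eq_def]
  cases l with
  | nil => simp [h]
  | cons x t => obtain ⟨a, b⟩ := x; simp [h]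

theorem buyLoopA_eq (price : Int) (l : List (Int × Int)) :
    ∀ amt, buyLoopA price amt l = sellLoopA (-price) amt l := by
  induction l with
  | nil =>
    intro amt
    rw [buyLoopA.eq_def, sellLoopA.eq_def]
  | cons x t ih =>
    obtain ⟨bq, ba⟩ := x
    intro amt
    by_cases hamt : 0 < amt
    · by_cases hg : price ≤ -bq
      · rw [buyLoopA.eq_def, sellLoopA.eq_def]
        simp only [if_pos hamt, if_pos hg, if_pos (show bq ≤ -price from by omega)]
        split_ifs with hc
        · rw [buyLoopA_stop _ _ _ (by omega), sellLoopA_stop _ _ _ (by omega)]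
        · exact ih _
      · rw [buyLoopA.eq_def, sellLoopA.eq_def]
        simp [hamt, hg, show ¬ bq ≤ -price from by omega]
    · rw [buyLoopA_stop _ _ _ hamt, sellLoopA_stop _ _ _ hamt]

theorem step_sim (row : List Int) (bh sh : List (Int × Int))
    (h1 : SortedLex bh) (h2 : PosA bh) (h3 : SortedLex sh) (h4 : PosA sh) :
    stepB (agg bh, agg sh) row
      = (agg (stepA (bh, sh) row).1, agg (stepA (bh, sh) row).2)
    ∧ SortedLex (stepA (bh, sh) row).1 ∧ PosA (stepA (bh, sh) row).1
    ∧ SortedLex (stepA (bh, sh) row).2 ∧ PosA (stepA (bh, sh) row).2 := by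
  rcases row with _ | ⟨p, _ | ⟨a, _ | ⟨ty, _ | ⟨z, rest4⟩⟩⟩⟩
  · exact ⟨rfl, h1, h2, h3, h4⟩
  · exact ⟨rfl, h1, h2, h3, h4⟩
  · exact ⟨rfl, h1, h2, h3, h4⟩
  · -- row = [p, a, ty]
    by_cases hty : ty = 0
    · subst hty
      have hsim := sell_sim p sh a h3 h4
      have hfillE : fill (- -p) a (agg sh) = sellLoopB p a (agg sh) := by
        rw [neg_neg]; exact fill_eq_sellLoopB _ _ _
      by_cases hpos : 0 < (sellLoopA p a sh).1
      · have e1 : stepA (bh, sh) [p, a, 0]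
            = (hpush (-p, (sellLoopA p a sh).1) bh, (sellLoopA p a sh).2) := by
          simp [stepA, hpos]
        have e2 : stepB (agg bh, agg sh) [p, a, 0]
            = (bump (-p) (sellLoopA p a sh).1 (agg bh), agg (sellLoopA p a sh).2) := by
          simp only [stepB, BEq.rfl, if_pos rfl, if_true, hfillE]
          rw [← hsim.1, ← hsim.2.1]
          simp [hpos]
        rw [e1, e2]
        refine ⟨?_, hpush_sorted _ _ h1, hpush_pos _ _ h2 hpos, hsim.2.2.1, hsim.2.2.2⟩
        rw [agg_hpush (-p) _ bh h1, bump_eq_addAsc]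
      · have e1 : stepA (bh, sh) [p, a, 0] = (bh, (sellLoopA p a sh).2) := by
          simp [stepA, hpos]
        have e2 : stepB (agg bh, agg sh) [p, a, 0]
            = (agg bh, agg (sellLoopA p a sh).2) := by
          simp only [stepB, BEq.rfl, if_pos rfl, if_true, hfillE]
          rw [← hsim.1, ← hsim.2.1]
          simp [hpos]
        rw [e1, e2]
        exact ⟨rfl, h1, h2, hsim.2.2.1, hsim.2.2.2⟩
    · have hr := buyLoopA_eq p bh a
      have hsim := sell_sim (-p) bh a h1 h2
      have hty' : (ty == 0) = false := by simp [hty]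
      have hfillE : fill (-p) a (agg bh) = sellLoopB (-p) a (agg bh) :=
        fill_eq_sellLoopB _ _ _
      have hfst : (sellLoopB (-p) a (agg bh)).1 = (buyLoopA p a bh).1 := by
        rw [hr]; exact hsim.1.symm
      have hsnd : (sellLoopB (-p) a (agg bh)).2 = agg (buyLoopA p a bh).2 := by
        rw [hr]; exact hsim.2.1.symm
      have hsp : SortedLex (buyLoopA p a bh).2 := by rw [hr]; exact hsim.2.2.1
      have hpp : PosA (buyLoopA p a bh).2 := by rw [hr]; exact hsim.2.2.2
      by_cases hpos : 0 < (buyLoopA p a bh).1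
      · have e1 : stepA (bh, sh) [p, a, ty]
            = ((buyLoopA p a bh).2, hpush (p, (buyLoopA p a bh).1) sh) := by
          simp [stepA, hty', hpos]
        have e2 : stepB (agg bh, agg sh) [p, a, ty]
            = (agg (buyLoopA p a bh).2, bump p (buyLoopA p a bh).1 (agg sh)) := by
          simp only [stepB, hty', Bool.false_eq_true, if_false, hfillE, hfst, hsnd]
          simp [hpos]
        rw [e1, e2]
        refine ⟨?_, hsp, hpp, hpush_sorted _ _ h3, hpush_pos _ _ h4 hpos⟩
        rw [agg_hpush p _ sh h3, bump_eq_addAsc]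
      · have e1 : stepA (bh, sh) [p, a, ty] = ((buyLoopA p a bh).2, sh) := by
          simp [stepA, hty', hpos]
        have e2 : stepB (agg bh, agg sh) [p, a, ty]
            = (agg (buyLoopA p a bh).2, agg sh) := by
          simp only [stepB, hty', Bool.false_eq_true, if_false, hfillE, hfst, hsnd]
          simp [hpos]
        rw [e1, e2]
        exact ⟨rfl, hsp, hpp, h3, h4⟩
  · exact ⟨rfl, h1, h2, h3, h4⟩

theorem fold_sim (rows : List (List Int)) :
    ∀ bh sh, SortedLex bh → PosA bh → SortedLex sh → PosA sh →
      rows.foldl stepB (agg bh, agg sh)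
        = (agg (rows.foldl stepA (bh, sh)).1, agg (rows.foldl stepA (bh, sh)).2)
      ∧ SortedLex (rows.foldl stepA (bh, sh)).1 ∧ PosA (rows.foldl stepA (bh, sh)).1
      ∧ SortedLex (rows.foldl stepA (bh, sh)).2 ∧ PosA (rows.foldl stepA (bh, sh)).2 := by
  induction rows with
  | nil =>
    intro bh sh h1 h2 h3 h4
    exact ⟨rfl, h1, h2, h3, h4⟩
  | cons row rest ih =>
    intro bh sh h1 h2 h3 h4
    obtain ⟨hstep, hb1, hb2, hb3, hb4⟩ := step_sim row bh sh h1 h2 h3 h4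
    rw [List.foldl_cons, List.foldl_cons, hstep]
    have := ih (stepA (bh, sh) row).1 (stepA (bh, sh) row).2 hb1 hb2 hb3 hb4
    simpa using this

-- ===== VERDICT (by name: the statement is the Claim_ definition above) =====
theorem getNumberOfBacklogOrders_spec : Claim_equal_getNumberOfBacklogOrders := by
  intro orders _ _
  unfold Spec_getNumberOfBacklogOrders
  have h := fold_sim orders [] [] (by simp [SortedLex]) (by simp [PosA])
    (by simp [SortedLex]) (by simp [PosA])
  unfold getNumberOfBacklogOrders getNumberOfBacklogOrders_alt
  have hinit : agg ([] : List (Int × Int)) = [] := by simp [agg]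
  rw [hinit] at h
  rw [h.1]
  simp [agg_sum]
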